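-- pv_equiv track=rewrite | github.com/typedb-osi/typedb-jupyter | src/typedb_jupyter/query.py | _get_query_args
-- ===== SOURCE A (Python) =====
-- def _get_query_args(query):
--     # Warning: This method is experimental and not guaranteed to always function correctly. Copy at your own risk.
--
--     in_escape = False
--     in_literal = False
--     in_comment = False
--     literal_delimiter = None
--     arg_string = ""
--
--     for char in query:
--         if in_escape:
--             in_escape = False
--             arg_string += " "
--             continue
--
--         if in_literal and char == "\\":
--             in_escape = True
--             arg_string += " "
--             continue
--
--         if not in_comment and char in ("\"", "'"):
--             if not in_literal:
--                 in_literal = True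
--                 literal_delimiter = char
--                 arg_string += " "
--                 continue
--             if in_literal and char == literal_delimiter:
--                 in_literal = False
--                 arg_string += " "
--                 continue
--
--         if not in_literal:
--             if char == "#":
--                 in_comment = True
--                 arg_string += " "
--                 continue
--             if in_comment and char == "\n":
--                 in_comment = False
--                 arg_string += " "
--                 continue
--
--         if not in_literal and not in_comment:
--             arg_string += char
--
--     return arg_string.replace(",", " ").replace(";", " ").split()
-- ===== SOURCE B (Python) =====
-- def _get_query_args(query):
--     # Span-skipping scanner: jump over whole literals/comments instead of per-char flags.
--     kept = []
--     i = 0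
--     n = len(query)
--     while i < n:
--         c = query[i]
--         if c == '"' or c == "'":
--             i += 1
--             while i < n:
--                 if query[i] == "\\":
--                     i += 2
--                 elif query[i] == c:
--                     i += 1
--                     break
--                 else:
--                     i += 1
--             kept.append(" ")
--         elif c == "#":
--             while i < n and query[i] != "\n":
--                 i += 1
--         else:
--             kept.append(" " if c in ",;" else c)
--             i += 1
--     return "".join(kept).split()
-- ===== Notes on version B (the rewrite author's own statement) =====
-- stated objective: simpler
-- what changed: Replaced the per-character five-flag state machine (in_escape/in_literal/in_comment/delimiter flags plus a post-hoc replace of ',' and ';') by a span-skipping scanner that jumps over a whole quoted literal or comment in one inner loop and maps separators during the single pass.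
import Mathlib
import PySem

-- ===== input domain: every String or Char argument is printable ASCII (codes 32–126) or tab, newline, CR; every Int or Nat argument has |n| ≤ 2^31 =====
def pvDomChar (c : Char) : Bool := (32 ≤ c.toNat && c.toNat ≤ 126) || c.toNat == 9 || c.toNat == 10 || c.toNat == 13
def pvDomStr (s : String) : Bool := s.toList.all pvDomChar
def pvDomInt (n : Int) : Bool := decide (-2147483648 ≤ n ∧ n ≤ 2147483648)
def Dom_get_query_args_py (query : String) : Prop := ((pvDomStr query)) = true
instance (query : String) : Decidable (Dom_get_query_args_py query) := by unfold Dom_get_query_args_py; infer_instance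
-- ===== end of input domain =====

-- B replaces A's per-character five-flag state machine by a span-skipping scanner
-- (jump over a whole literal/comment at once); objective: simpler, same cost.

-- ===== PORT A =====
-- state = (in_escape, in_literal, in_comment, literal_delimiter, arg_string)
def stepQ (st : Bool × Bool × Bool × Option Char × List Char) (c : Char) :
    Bool × Bool × Bool × Option Char × List Char :=
  match st with
  | (inEscape, inLiteral, inComment, delim, arg) =>
    if inEscape then (false, inLiteral, inComment, delim, arg ++ [' '])
    else if inLiteral && (c == '\\') then (true, inLiteral, inComment, delim, arg ++ [' '])
    else if !inComment && (c == '"' || c == '\'') && !inLiteral then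
      (inEscape, true, inComment, some c, arg ++ [' '])
    else if !inComment && (c == '"' || c == '\'') && inLiteral && (delim == some c) then
      (inEscape, false, inComment, delim, arg ++ [' '])
    else if !inLiteral && (c == '#') then (inEscape, inLiteral, true, delim, arg ++ [' '])
    else if !inLiteral && inComment && (c == '\n') then
      (inEscape, inLiteral, false, delim, arg ++ [' '])
    else if !inLiteral && !inComment then (inEscape, inLiteral, inComment, delim, arg ++ [c])
    else st

def get_query_args_py (query : String) : List String :=
  let fin := query.toList.foldl stepQ (false, false, false, none, [])
  PySem.Str.split₀
    (PySem.Str.replace (PySem.Str.replace (String.ofList fin.2.2.2.2) "," " ") ";" " ")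

-- ===== PORT B =====
def skipLit (d : Char) : List Char → List Char
  | [] => []
  | c :: rest =>
    if c = '\\' then skipLit d (rest.drop 1)
    else if c = d then rest
    else skipLit d rest
termination_by l => l.length
decreasing_by
  · simp only [List.length_cons, List.length_drop]; omega
  · simp

theorem skipLit_length_le (d : Char) (l : List Char) : (skipLit d l).length ≤ l.length := by
  have H : ∀ (n : Nat) (l : List Char), l.length ≤ n → (skipLit d l).length ≤ l.length := by
    intro n
    induction n with
    | zero =>
      intro l hl
      have : l = [] := List.length_eq_zero_iff.mp (Nat.le_zero.mp hl)
      subst this; simp [skipLit]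
    | succ k ih =>
      intro l hl
      cases l with
      | nil => simp [skipLit]
      | cons c rest =>
        have hr : rest.length ≤ k := by simp only [List.length_cons] at hl; omega
        rw [skipLit]
        split
        · have hd1 : (rest.drop 1).length ≤ k := by
            simp only [List.length_drop]; omega
          have := ih (rest.drop 1) hd1
          simp only [List.length_drop] at this ⊢
          simp only [List.length_cons]; omega
        · split
          · simp
          · have := ih rest hr
            simp only [List.length_cons]; omega
  exact H l.length l le_rfl

def scanB : List Char → List Char
  | [] => []
  | c :: rest =>
    if c = '"' ∨ c = '\'' then ' ' :: scanB (skipLit c rest)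
    else if c = '#' then scanB (rest.dropWhile (· ≠ '\n'))
    else (if c = ',' ∨ c = ';' then ' ' else c) :: scanB rest
termination_by l => l.length
decreasing_by
  · have := skipLit_length_le c rest; simp only [List.length_cons]; omega
  · have := List.length_dropWhile_le (· ≠ '\n') rest; simp only [List.length_cons]; omega
  · simp

def get_query_args_py_alt (query : String) : List String :=
  PySem.Str.split₀ (String.ofList (scanB query.toList))

-- ===== PRECONDITION & SPEC =====
def Spec_get_query_args_py (query : String) (out : List String) : Prop := out = get_query_args_py_alt query
instance (query : String) (out : List String) : Decidable (Spec_get_query_args_py query out) := by unfold Spec_get_query_args_py; infer_instance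

-- ===== CLAIM (what is proved, stated in full; the proofs are below) =====
def Claim_equal_get_query_args_py : Prop := ∀ (query : String), Dom_get_query_args_py query → Spec_get_query_args_py query (get_query_args_py query)

-- ===== LEMMAS AND PROOFS =====

-- A's machine as a mode automaton: what it APPENDS from each mode.
inductive QMode : Type
  | normal : QMode
  | lit : Char → QMode
  | esc : Char → QMode
  | comment : QMode

def emit : QMode → List Char → List Char
  | _, [] => []
  | .esc d, _ :: rest => ' ' :: emit (.lit d) rest
  | .lit d, c :: rest =>
    if c = '\\' then ' ' :: emit (.esc d) rest
    else if (c = '"' ∨ c = '\'') ∧ c = d then ' ' :: emit .normal rest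
    else emit (.lit d) rest
  | .comment, c :: rest =>
    if c = '#' then ' ' :: emit .comment rest
    else if c = '\n' then ' ' :: emit .normal rest
    else emit .comment rest
  | .normal, c :: rest =>
    if c = '"' ∨ c = '\'' then ' ' :: emit (.lit c) rest
    else if c = '#' then ' ' :: emit .comment rest
    else c :: emit .normal rest

def encSt : QMode → Option Char → List Char → Bool × Bool × Bool × Option Char × List Char
  | .normal, d0, acc => (false, false, false, d0, acc)
  | .lit d, _, acc => (false, true, false, some d, acc)
  | .esc d, _, acc => (true, true, false, some d, acc)
  | .comment, d0, acc => (false, false, true, d0, acc)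

def repl (c : Char) : Char := if c = ',' then ' ' else if c = ';' then ' ' else c

def pushW (cur : List Char) (acc : List (List Char)) : List (List Char) :=
  if cur.isEmpty then acc else cur.reverse :: acc

theorem sN_quote (c : Char) (d0 : Option Char) (acc : List Char) (hq : c = '"' ∨ c = '\'') :
    stepQ (false, false, false, d0, acc) c = (false, true, false, some c, acc ++ [' ']) := by
  rcases hq with h | h <;> subst h <;> simp [stepQ]

theorem sN_hash (d0 : Option Char) (acc : List Char) :
    stepQ (false, false, false, d0, acc) '#' = (false, false, true, d0, acc ++ [' ']) := by
  simp [stepQ]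

theorem sN_other (c : Char) (d0 : Option Char) (acc : List Char)
    (hq : ¬(c = '"' ∨ c = '\'')) (hh : ¬ c = '#') :
    stepQ (false, false, false, d0, acc) c = (false, false, false, d0, acc ++ [c]) := by
  have h1 : ¬ c = '"' := fun h => hq (Or.inl h)
  have h2 : ¬ c = '\'' := fun h => hq (Or.inr h)
  simp [stepQ, h1, h2, hh]

theorem sL_bs (d : Char) (acc : List Char) :
    stepQ (false, true, false, some d, acc) '\\' = (true, true, false, some d, acc ++ [' ']) := by
  simp [stepQ]

theorem sL_close (c : Char) (acc : List Char) (hq : c = '"' ∨ c = '\'') :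
    stepQ (false, true, false, some c, acc) c = (false, false, false, some c, acc ++ [' ']) := by
  rcases hq with h | h <;> subst h <;> simp [stepQ]

theorem sL_other (c d : Char) (acc : List Char) (hb : ¬ c = '\\')
    (hno : ¬ ((c = '"' ∨ c = '\'') ∧ c = d)) :
    stepQ (false, true, false, some d, acc) c = (false, true, false, some d, acc) := by
  by_cases hq : c = '"' ∨ c = '\''
  · have hcd : ¬ c = d := fun h => hno ⟨hq, h⟩
    have : ¬ ((some d : Option Char) == some c) = true := by
      simp; exact fun h => hcd h.symm
    rcases hq with h | h <;> subst h <;> simp_all [stepQ]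
  · have h1 : ¬ c = '"' := fun h => hq (Or.inl h)
    have h2 : ¬ c = '\'' := fun h => hq (Or.inr h)
    simp [stepQ, hb, h1, h2]

theorem sE (c d : Char) (acc : List Char) :
    stepQ (true, true, false, some d, acc) c = (false, true, false, some d, acc ++ [' ']) := by
  simp [stepQ]

theorem sC_hash (d0 : Option Char) (acc : List Char) :
    stepQ (false, false, true, d0, acc) '#' = (false, false, true, d0, acc ++ [' ']) := by
  simp [stepQ]

theorem sC_nl (d0 : Option Char) (acc : List Char) :
    stepQ (false, false, true, d0, acc) '\n' = (false, false, false, d0, acc ++ [' ']) := by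
  simp [stepQ]

theorem sC_other (c : Char) (d0 : Option Char) (acc : List Char)
    (hh : ¬ c = '#') (hn : ¬ c = '\n') :
    stepQ (false, false, true, d0, acc) c = (false, false, true, d0, acc) := by
  by_cases hq : c = '"' ∨ c = '\''
  · rcases hq with h | h <;> subst h <;> simp [stepQ]
  · have h1 : ¬ c = '"' := fun h => hq (Or.inl h)
    have h2 : ¬ c = '\'' := fun h => hq (Or.inr h)
    simp [stepQ, hh, hn]

theorem foldl_stepQ (l : List Char) : ∀ (m : QMode) (d0 : Option Char) (acc : List Char),
    (l.foldl stepQ (encSt m d0 acc)).2.2.2.2 = acc ++ emit m l := by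
  induction l with
  | nil => intro m d0 acc; cases m <;> simp [encSt, emit]
  | cons c rest ih =>
    intro m d0 acc
    cases m with
    | normal =>
      by_cases hq : c = '"' ∨ c = '\''
      · rw [List.foldl_cons, show encSt QMode.normal d0 acc = (false, false, false, d0, acc) from rfl,
          sN_quote c d0 acc hq,
          show (false, true, false, some c, acc ++ [' ']) = encSt (QMode.lit c) d0 (acc ++ [' ']) from rfl,
          ih, emit, if_pos hq]
        simp
      · by_cases hh : c = '#'
        · subst hh
          rw [List.foldl_cons, show encSt QMode.normal d0 acc = (false, false, false, d0, acc) from rfl,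
            sN_hash d0 acc,
            show (false, false, true, d0, acc ++ [' ']) = encSt QMode.comment d0 (acc ++ [' ']) from rfl,
            ih, emit, if_neg hq, if_pos rfl]
          simp
        · rw [List.foldl_cons, show encSt QMode.normal d0 acc = (false, false, false, d0, acc) from rfl,
            sN_other c d0 acc hq hh,
            show (false, false, false, d0, acc ++ [c]) = encSt QMode.normal d0 (acc ++ [c]) from rfl,
            ih, emit, if_neg hq, if_neg hh]
          simp
    | lit d =>
      by_cases hb : c = '\\'
      · subst hb
        rw [List.foldl_cons, show encSt (QMode.lit d) d0 acc = (false, true, false, some d, acc) from rfl,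
          sL_bs d acc,
          show (true, true, false, some d, acc ++ [' ']) = encSt (QMode.esc d) d0 (acc ++ [' ']) from rfl,
          ih, emit, if_pos rfl]
        simp
      · by_cases hq : (c = '"' ∨ c = '\'') ∧ c = d
        · obtain ⟨hq1, hq2⟩ := hq
          subst hq2
          rw [List.foldl_cons, show encSt (QMode.lit c) d0 acc = (false, true, false, some c, acc) from rfl,
            sL_close c acc hq1,
            show (false, false, false, some c, acc ++ [' ']) = encSt QMode.normal (some c) (acc ++ [' ']) from rfl,
            ih, emit, if_neg hb, if_pos ⟨hq1, rfl⟩]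
          simp
        · rw [List.foldl_cons, show encSt (QMode.lit d) d0 acc = (false, true, false, some d, acc) from rfl,
            sL_other c d acc hb hq,
            show (false, true, false, some d, acc) = encSt (QMode.lit d) d0 acc from rfl,
            ih, emit, if_neg hb, if_neg hq]
    | esc d =>
      rw [List.foldl_cons, show encSt (QMode.esc d) d0 acc = (true, true, false, some d, acc) from rfl,
        sE c d acc,
        show (false, true, false, some d, acc ++ [' ']) = encSt (QMode.lit d) d0 (acc ++ [' ']) from rfl,
        ih, show emit (QMode.esc d) (c :: rest) = ' ' :: emit (QMode.lit d) rest from rfl]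
      simp
    | comment =>
      by_cases hh : c = '#'
      · subst hh
        rw [List.foldl_cons, show encSt QMode.comment d0 acc = (false, false, true, d0, acc) from rfl,
          sC_hash d0 acc,
          show (false, false, true, d0, acc ++ [' ']) = encSt QMode.comment d0 (acc ++ [' ']) from rfl,
          ih, emit, if_pos rfl]
        simp
      · by_cases hn : c = '\n'
        · subst hn
          rw [List.foldl_cons, show encSt QMode.comment d0 acc = (false, false, true, d0, acc) from rfl,
            sC_nl d0 acc,
            show (false, false, false, d0, acc ++ [' ']) = encSt QMode.normal d0 (acc ++ [' ']) from rfl,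
            ih, emit, if_neg hh, if_pos rfl]
          simp
        · rw [List.foldl_cons, show encSt QMode.comment d0 acc = (false, false, true, d0, acc) from rfl,
            sC_other c d0 acc hh hn,
            show (false, false, true, d0, acc) = encSt QMode.comment d0 acc from rfl,
            ih, emit, if_neg hh, if_neg hn]

-- single-character replace is a map
theorem replace_go_single (o n : Char) (l : List Char) :
    ∀ (fuel : Nat) (acc : List Char), l.length ≤ fuel →
    PySem.Chars.replace.go [o] [n] fuel l acc
      = acc.reverse ++ l.map (fun c => if c = o then n else c) := by
  induction l with
  | nil =>
    intro fuel acc _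
    cases fuel <;> simp [PySem.Chars.replace.go]
  | cons c t ih =>
    intro fuel acc hle
    cases fuel with
    | zero => simp at hle
    | succ k =>
      rw [PySem.Chars.replace.go]
      by_cases h : c = o
      · have hp : [o].isPrefixOf (c :: t) = true := by simp [List.isPrefixOf, h]
        rw [if_pos hp]
        rw [show List.drop [o].length (c :: t) = t by simp]
        rw [ih k ([n].reverse ++ acc) (by simpa using Nat.lt_succ_iff.mp (by simpa using hle))]
        simp [h]
      · have hp : ¬ ([o].isPrefixOf (c :: t) = true) := by
          simp [List.isPrefixOf]; exact fun hh => absurd hh.symm (by simpa using h)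
        rw [if_neg hp]
        rw [ih k (c :: acc) (by simpa using Nat.lt_succ_iff.mp (by simpa using hle))]
        simp [h]

theorem replace_single (o n : Char) (l : List Char) :
    PySem.Chars.replace l [o] [n] = l.map (fun c => if c = o then n else c) := by
  rw [PySem.Chars.replace]
  simp only [List.isEmpty_cons, if_false, Bool.false_eq_true]
  exact replace_go_single o n l l.length [] le_rfl

-- split₀.go step lemmas
theorem go_nil (cur : List Char) (acc : List (List Char)) :
    PySem.Chars.split₀.go [] cur acc = (pushW cur acc).reverse := by
  rw [PySem.Chars.split₀.go, pushW]; split <;> simp_all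

theorem go_cons (c : Char) (rest cur : List Char) (acc : List (List Char)) :
    PySem.Chars.split₀.go (c :: rest) cur acc =
      if PySem.Chars.isspace c then PySem.Chars.split₀.go rest [] (pushW cur acc)
      else PySem.Chars.split₀.go rest (c :: cur) acc := by
  rw [PySem.Chars.split₀.go, pushW]
  split_ifs <;> simp_all

theorem go_space (rest cur : List Char) (acc : List (List Char)) :
    PySem.Chars.split₀.go (' ' :: rest) cur acc
      = PySem.Chars.split₀.go rest [] (pushW cur acc) := by
  rw [go_cons]; simp [PySem.Chars.isspace]

theorem pushW_nil (acc : List (List Char)) : pushW [] acc = acc := by simp [pushW]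

-- the heart: A's (replace-mapped) emission and B's scan produce the same split₀.go result
theorem main_equiv (n : Nat) : ∀ (l : List Char), l.length ≤ n →
    (∀ cur acc, PySem.Chars.split₀.go ((emit .normal l).map repl) cur acc
        = PySem.Chars.split₀.go (scanB l) cur acc)
    ∧ (∀ (d : Char), (d = '"' ∨ d = '\'') → ∀ acc,
        PySem.Chars.split₀.go ((emit (.lit d) l).map repl) [] acc
        = PySem.Chars.split₀.go (scanB (skipLit d l)) [] acc)
    ∧ (∀ cur acc, PySem.Chars.split₀.go ((emit .comment l).map repl) [] (pushW cur acc)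
        = PySem.Chars.split₀.go (scanB (l.dropWhile (· ≠ '\n'))) cur acc) := by
  induction n with
  | zero =>
    intro l hl
    have : l = [] := List.length_eq_zero_iff.mp (Nat.le_zero.mp hl)
    subst this
    refine ⟨?_, ?_, ?_⟩ <;> intros <;>
      simp [emit, scanB, skipLit, go_nil, pushW_nil, List.dropWhile]
  | succ k ih =>
    intro l hl
    cases l with
    | nil =>
      refine ⟨?_, ?_, ?_⟩ <;> intros <;>
        simp [emit, scanB, skipLit, go_nil, pushW_nil, List.dropWhile]
    | cons c rest =>
      have hrest : rest.length ≤ k := by simpa using Nat.lt_succ_iff.mp (by simpa using hl)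
      refine ⟨?_, ?_, ?_⟩
      · -- normal mode
        intro cur acc
        by_cases hq : c = '"' ∨ c = '\''
        · rw [emit, if_pos hq, scanB, if_pos hq]
          simp only [List.map_cons, show repl ' ' = ' ' from rfl]
          rw [go_space, go_space]
          exact (ih rest hrest).2.1 c hq (pushW cur acc)
        · by_cases hh : c = '#'
          · rw [emit, if_neg hq, if_pos hh, scanB, if_neg hq, if_pos hh]
            simp only [List.map_cons, show repl ' ' = ' ' from rfl]
            rw [go_space]
            exact (ih rest hrest).2.2 cur acc
          · rw [emit, if_neg hq, if_neg hh, scanB, if_neg hq, if_neg hh]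
            simp only [List.map_cons]
            by_cases hcs : c = ',' ∨ c = ';'
            · have hr : repl c = ' ' := by rcases hcs with h | h <;> simp [repl, h]
              rw [hr, if_pos hcs, go_space, go_space]
              exact (ih rest hrest).1 [] (pushW cur acc)
            · have hr : repl c = c := by
                have h1 : ¬ c = ',' := fun h => hcs (Or.inl h)
                have h2 : ¬ c = ';' := fun h => hcs (Or.inr h)
                simp [repl, h1, h2]
              rw [hr, if_neg hcs, go_cons, go_cons]
              split
              · exact (ih rest hrest).1 [] (pushW cur acc)
              · exact (ih rest hrest).1 (c :: cur) acc
      · -- literal mode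
        intro d hd acc
        by_cases hb : c = '\\'
        · rw [emit, if_pos hb, skipLit, if_pos hb]
          simp only [List.map_cons, show repl ' ' = ' ' from rfl]
          rw [go_space, pushW_nil]
          cases rest with
          | nil => simp [emit, skipLit, go_nil, scanB, pushW_nil]
          | cons h2 t =>
            rw [show emit (.esc d) (h2 :: t) = ' ' :: emit (.lit d) t from rfl]
            simp only [List.map_cons, show repl ' ' = ' ' from rfl]
            rw [go_space, pushW_nil]
            have ht : t.length ≤ k := by
              simp only [List.length_cons] at hl hrest ⊢; omega
            have := (ih t ht).2.1 d hd acc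
            simpa using this
        · by_cases hq : (c = '"' ∨ c = '\'') ∧ c = d
          · rw [emit, if_neg hb, if_pos hq, skipLit, if_neg hb, if_pos hq.2]
            simp only [List.map_cons, show repl ' ' = ' ' from rfl]
            rw [go_space, pushW_nil]
            exact (ih rest hrest).1 [] acc
          · have hne : ¬ c = d ∨ ¬ (c = '"' ∨ c = '\'') := by tauto
            rw [emit, if_neg hb, if_neg hq]
            have hcd : ¬ c = d := by
              intro h; subst h
              exact hq ⟨hd, rfl⟩
            have hskip : skipLit d (c :: rest) = skipLit d rest := by
              rw [skipLit, if_neg hb, if_neg hcd]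
            rw [hskip]
            exact (ih rest hrest).2.1 d hd acc
      · -- comment mode
        intro cur acc
        by_cases hn : c = '\n'
        · rw [emit, if_neg (by simp [hn]), if_pos hn]
          simp only [List.map_cons, show repl ' ' = ' ' from rfl]
          rw [go_space, pushW_nil]
          have hd : (c :: rest).dropWhile (· ≠ '\n') = c :: rest := by
            rw [List.dropWhile]; simp [hn]
          rw [hd, scanB, if_neg (by simp [hn] : ¬(c = '"' ∨ c = '\'')), if_neg (by simp [hn]),
            if_neg (by simp [hn] : ¬(c = ',' ∨ c = ';'))]
          rw [go_cons]
          simp only [hn, show PySem.Chars.isspace '\n' = true from rfl, if_pos]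
          exact (ih rest hrest).1 [] (pushW cur acc)
        · by_cases hh : c = '#'
          · rw [emit, if_pos hh]
            simp only [List.map_cons, show repl ' ' = ' ' from rfl]
            rw [go_space, pushW_nil]
            have hd : (c :: rest).dropWhile (· ≠ '\n') = rest.dropWhile (· ≠ '\n') := by
              rw [List.dropWhile]; simp [hh]
            rw [hd]
            exact (ih rest hrest).2.2 cur acc
          · rw [emit, if_neg hh, if_neg hn]
            have hd : (c :: rest).dropWhile (· ≠ '\n') = rest.dropWhile (· ≠ '\n') := by
              rw [List.dropWhile]; simp [hn]
            rw [hd]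
            exact (ih rest hrest).2.2 cur acc

theorem final_step (s t : String)
    (h : PySem.Chars.split₀ s.toList = PySem.Chars.split₀ t.toList) :
    PySem.Str.split₀ s = PySem.Str.split₀ t := by
  simp only [PySem.Str.split₀, h]

-- ===== VERDICT (by name: the statement is the Claim_ definition above) =====
theorem get_query_args_py_spec : Claim_equal_get_query_args_py := by
  intro query _
  unfold Spec_get_query_args_py
  have hfold := foldl_stepQ query.toList .normal none []
  simp only [encSt] at hfold
  simp only [get_query_args_py, get_query_args_py_alt]
  apply final_step
  rw [PySem.Str.toList_replace, PySem.Str.toList_replace, String.toList_ofList,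
    String.toList_ofList, hfold]
  simp only [List.nil_append]
  simp only [show (";" : String).toList = [';'] from rfl,
    show (" " : String).toList = [' '] from rfl, String.toList_ofList]
  rw [replace_single, replace_single, List.map_map]
  have hmaps : ((fun c => if c = ';' then ' ' else c) ∘ fun c => if c = ',' then ' ' else c)
      = repl := by
    funext c; by_cases h1 : c = ',' <;> by_cases h2 : c = ';' <;> simp [repl, h1, h2]
  rw [hmaps]
  simp only [PySem.Chars.split₀]
  exact (main_equiv query.toList.length query.toList le_rfl).1 [] []
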